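-- pv_equiv track=rewrite | github.com/Pedroman17/nlap | lab_3/main.py | simple_pos_tag
-- ===== SOURCE A (Python) =====
-- def simple_pos_tag(tokens):
--
--     tags = []
--
--     for word in tokens:
--
--         if word.endswith("ing") or word.endswith("ed"):
--             pos = "VERB"
--
--         elif word.endswith("ly"):
--             pos = "ADV"
--
--         elif word.endswith("tion") or word.endswith("ment"):
--             pos = "NOUN"
--
--         elif word.endswith("ous") or word.endswith("able"):
--             pos = "ADJ"
--
--         else:
--             pos = "WORD"
--
--         tags.append((word, pos))
--
--     return tags
-- ===== SOURCE B (Python) =====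
-- SUFFIX_TAGS = {"ed": "VERB", "ing": "VERB", "ly": "ADV",
--                "tion": "NOUN", "ment": "NOUN", "ous": "ADJ", "able": "ADJ"}
--
-- def simple_pos_tag(tokens):
--     tags = []
--     for word in tokens:
--         pos = "WORD"
--         for k in (2, 3, 4):
--             t = SUFFIX_TAGS.get(word[-k:])
--             if t is not None:
--                 pos = t
--                 break
--         tags.append((word, pos))
--     return tags
-- ===== Notes on version B (the rewrite author's own statement) =====
-- stated objective: alternative
-- what changed: Instead of testing the word against seven endswith conditions in an if/elif chain, B slices the word's 2-, 3- and 4-character tails and looks each up in a suffix-to-tag dictionary, breaking on the first hit; this is correct because no two of the seven suffixes can end the same word, so the chain's priority never matters.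
import Mathlib
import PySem

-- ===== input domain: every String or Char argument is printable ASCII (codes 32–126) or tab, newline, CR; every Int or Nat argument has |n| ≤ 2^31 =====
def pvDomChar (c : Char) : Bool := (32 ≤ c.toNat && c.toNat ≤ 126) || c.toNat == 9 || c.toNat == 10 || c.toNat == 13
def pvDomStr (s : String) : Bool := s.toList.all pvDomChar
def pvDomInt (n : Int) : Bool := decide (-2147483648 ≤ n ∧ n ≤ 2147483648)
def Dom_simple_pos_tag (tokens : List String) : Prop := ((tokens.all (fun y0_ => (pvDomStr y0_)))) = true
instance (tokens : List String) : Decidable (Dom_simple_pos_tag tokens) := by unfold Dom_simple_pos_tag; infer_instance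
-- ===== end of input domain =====

-- B replaces A's ordered endswith chain by hashing the word's 2/3/4-character tail into a
-- suffix→tag dictionary (correct since no two of the seven suffixes can end the same word).
-- ===== PORT A =====
def simple_pos_tag (tokens : List String) : List (String × String) :=
  tokens.foldl (fun tags word =>
    let pos :=
      if PySem.Str.endswith word "ing" || PySem.Str.endswith word "ed" then "VERB"
      else if PySem.Str.endswith word "ly" then "ADV"
      else if PySem.Str.endswith word "tion" || PySem.Str.endswith word "ment" then "NOUN"
      else if PySem.Str.endswith word "ous" || PySem.Str.endswith word "able" then "ADJ"
      else "WORD"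
    tags ++ [(word, pos)]) []

-- ===== PORT B =====
def pvSuffixTags : PySem.Dict String String :=
  PySem.Dict.ofList [("ed", "VERB"), ("ing", "VERB"), ("ly", "ADV"),
                     ("tion", "NOUN"), ("ment", "NOUN"), ("ous", "ADJ"), ("able", "ADJ")]

-- the inner 'for k in (2, 3, 4): … break' loop of Source B, with pos = "WORD" as the fall-through
def pvTagLoop (word : String) : List Int → String
  | [] => "WORD"
  | k :: ks =>
    match PySem.Dict.get? pvSuffixTags (PySem.Str.slice word (some (-k)) none) with
    | some t => t
    | none => pvTagLoop word ks

def simple_pos_tag_alt (tokens : List String) : List (String × String) :=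
  tokens.foldl (fun tags word => tags ++ [(word, pvTagLoop word [2, 3, 4])]) []

-- ===== PRECONDITION & SPEC =====
def Spec_simple_pos_tag (tokens : List String) (out : List (String × String)) : Prop := out = simple_pos_tag_alt tokens
instance (tokens : List String) (out : List (String × String)) : Decidable (Spec_simple_pos_tag tokens out) := by unfold Spec_simple_pos_tag; infer_instance

-- ===== CLAIM (what is proved, stated in full; the proofs are below) =====
def Claim_equal_simple_pos_tag : Prop := ∀ (tokens : List String), Dom_simple_pos_tag tokens → Spec_simple_pos_tag tokens (simple_pos_tag tokens)

-- ===== LEMMAS AND PROOFS =====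

lemma toList_slice_neg (word : String) (k : Nat) (hk : 0 < k) :
    (PySem.Str.slice word (some (-(k : Int))) none).toList = word.toList.drop (word.toList.length - k) := by
  rw [PySem.Str.toList_slice, PySem.Chars.slice_eq_listSlice, PySem.List.slice_from_neg_natCast _ _ hk]

lemma slice_eq_iff_endswith (word s : String) (k : Nat) (hs : s.toList.length = k) (hk : 0 < k) :
    PySem.Str.slice word (some (-(k : Int))) none = s ↔ PySem.Str.endswith word s = true := by
  rw [← String.toList_inj, toList_slice_neg _ _ hk, PySem.Str.endswith_eq,
    PySem.Chars.endswith_iff, List.suffix_iff_eq_drop, hs, eq_comm]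

lemma endswith_of_slice_eq (word s : String) (k : Nat) (hk : 0 < k) :
    PySem.Str.slice word (some (-(k : Int))) none = s → PySem.Str.endswith word s = true := by
  intro h
  rw [PySem.Str.endswith_eq, PySem.Chars.endswith_iff]
  have h' : s.toList = word.toList.drop (word.toList.length - k) := by
    rw [← h, toList_slice_neg _ _ hk]
  rw [h']
  exact List.drop_suffix _ _

lemma slice_ne_of_long (word s : String) (k : Nat) (hs : k < s.toList.length) (hk : 0 < k) :
    PySem.Str.slice word (some (-(k : Int))) none ≠ s := by
  intro h
  have h' : word.toList.drop (word.toList.length - k) = s.toList := by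
    rw [← toList_slice_neg _ _ hk, h]
  have hlen := congrArg List.length h'
  rw [List.length_drop] at hlen
  omega

lemma not_endswith_both (word s₁ s₂ : String)
    (h : ¬ s₁.toList <:+ s₂.toList ∧ ¬ s₂.toList <:+ s₁.toList) :
    ¬ (PySem.Str.endswith word s₁ = true ∧ PySem.Str.endswith word s₂ = true) := by
  rintro ⟨h1, h2⟩
  rw [PySem.Str.endswith_eq, PySem.Chars.endswith_iff] at h1 h2
  rcases List.suffix_or_suffix_of_suffix h1 h2 with hs | hs
  · exact h.1 hs
  · exact h.2 hs

lemma tag_eq (word : String) :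
    pvTagLoop word [2, 3, 4] =
    (if PySem.Str.endswith word "ing" || PySem.Str.endswith word "ed" then "VERB"
     else if PySem.Str.endswith word "ly" then "ADV"
     else if PySem.Str.endswith word "tion" || PySem.Str.endswith word "ment" then "NOUN"
     else if PySem.Str.endswith word "ous" || PySem.Str.endswith word "able" then "ADJ"
     else "WORD") := by
  have hD : pvSuffixTags = PySem.Dict.mk [("ed", "VERB"), ("ing", "VERB"), ("ly", "ADV"),
      ("tion", "NOUN"), ("ment", "NOUN"), ("ous", "ADJ"), ("able", "ADJ")] := rfl
  have i_ed := slice_eq_iff_endswith word "ed" 2 (by decide) (by norm_num)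
  have i_ly := slice_eq_iff_endswith word "ly" 2 (by decide) (by norm_num)
  have i_ing := slice_eq_iff_endswith word "ing" 3 (by decide) (by norm_num)
  have i_ous := slice_eq_iff_endswith word "ous" 3 (by decide) (by norm_num)
  have i_tion := slice_eq_iff_endswith word "tion" 4 (by decide) (by norm_num)
  have i_ment := slice_eq_iff_endswith word "ment" 4 (by decide) (by norm_num)
  have i_able := slice_eq_iff_endswith word "able" 4 (by decide) (by norm_num)
  have p_ed3 := endswith_of_slice_eq word "ed" 3 (by norm_num)
  have p_ly3 := endswith_of_slice_eq word "ly" 3 (by norm_num)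
  have p_ed4 := endswith_of_slice_eq word "ed" 4 (by norm_num)
  have p_ly4 := endswith_of_slice_eq word "ly" 4 (by norm_num)
  have p_ing4 := endswith_of_slice_eq word "ing" 4 (by norm_num)
  have p_ous4 := endswith_of_slice_eq word "ous" 4 (by norm_num)
  have n_ing2 := slice_ne_of_long word "ing" 2 (by decide) (by norm_num)
  have n_ous2 := slice_ne_of_long word "ous" 2 (by decide) (by norm_num)
  have n_tion2 := slice_ne_of_long word "tion" 2 (by decide) (by norm_num)
  have n_ment2 := slice_ne_of_long word "ment" 2 (by decide) (by norm_num)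
  have n_able2 := slice_ne_of_long word "able" 2 (by decide) (by norm_num)
  have n_tion3 := slice_ne_of_long word "tion" 3 (by decide) (by norm_num)
  have n_ment3 := slice_ne_of_long word "ment" 3 (by decide) (by norm_num)
  have n_able3 := slice_ne_of_long word "able" 3 (by decide) (by norm_num)
  have x_ingly := not_endswith_both word "ing" "ly" (by decide)
  have x_oustion := not_endswith_both word "ous" "tion" (by decide)
  have x_ousment := not_endswith_both word "ous" "ment" (by decide)
  simp only [Nat.cast_ofNat] at i_ed i_ly i_ing i_ous i_tion i_ment i_able p_ed3 p_ly3 p_ed4 p_ly4 p_ing4 p_ous4 n_ing2 n_ous2 n_tion2 n_ment2 n_able2 n_tion3 n_ment3 n_able3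
  simp only [pvTagLoop, hD]
  cases hed : PySem.Str.endswith word "ed" with
  | true =>
    rw [i_ed.mpr hed]
    simp [PySem.Dict.get?_mk_cons]
  | false =>
    have t_ed := (not_congr i_ed).mpr (ne_true_of_eq_false hed)
    cases hly : PySem.Str.endswith word "ly" with
    | true =>
      have hing : PySem.Str.endswith word "ing" = false := by
        cases hing : PySem.Str.endswith word "ing"
        · rfl
        · exact absurd ⟨hing, hly⟩ x_ingly
      rw [i_ly.mpr hly]
      (simp only [hing]); simp [PySem.Dict.get?_mk_cons]
    | false =>
      have t_ly := (not_congr i_ly).mpr (ne_true_of_eq_false hly)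
      have t_ed3 : PySem.Str.slice word (some (-3)) none ≠ "ed" := fun h => ne_true_of_eq_false hed (p_ed3 h)
      have t_ly3 : PySem.Str.slice word (some (-3)) none ≠ "ly" := fun h => ne_true_of_eq_false hly (p_ly3 h)
      cases hing : PySem.Str.endswith word "ing" with
      | true =>
        rw [i_ing.mpr hing]
        simp [PySem.Dict.get?, Ne.symm t_ed, Ne.symm t_ly, Ne.symm n_ing2, Ne.symm n_ous2, Ne.symm n_tion2, Ne.symm n_ment2, Ne.symm n_able2]
      | false =>
        have t_ing := (not_congr i_ing).mpr (ne_true_of_eq_false hing)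
        cases hous : PySem.Str.endswith word "ous" with
        | true =>
          have htion : PySem.Str.endswith word "tion" = false := by
            cases h : PySem.Str.endswith word "tion"
            · rfl
            · exact absurd ⟨hous, h⟩ x_oustion
          have hment : PySem.Str.endswith word "ment" = false := by
            cases h : PySem.Str.endswith word "ment"
            · rfl
            · exact absurd ⟨hous, h⟩ x_ousment
          rw [i_ous.mpr hous]
          (simp only [htion, hment]); simp [PySem.Dict.get?, Ne.symm t_ed, Ne.symm t_ly, Ne.symm n_ing2, Ne.symm n_ous2, Ne.symm n_tion2, Ne.symm n_ment2, Ne.symm n_able2]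
        | false =>
          have t_ous := (not_congr i_ous).mpr (ne_true_of_eq_false hous)
          have t_ed4 : PySem.Str.slice word (some (-4)) none ≠ "ed" := fun h => ne_true_of_eq_false hed (p_ed4 h)
          have t_ly4 : PySem.Str.slice word (some (-4)) none ≠ "ly" := fun h => ne_true_of_eq_false hly (p_ly4 h)
          have t_ing4 : PySem.Str.slice word (some (-4)) none ≠ "ing" := fun h => ne_true_of_eq_false hing (p_ing4 h)
          have t_ous4 : PySem.Str.slice word (some (-4)) none ≠ "ous" := fun h => ne_true_of_eq_false hous (p_ous4 h)
          cases htion : PySem.Str.endswith word "tion" with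
          | true =>
            rw [i_tion.mpr htion]
            simp [PySem.Dict.get?, Ne.symm t_ed, Ne.symm t_ly, Ne.symm n_ing2, Ne.symm n_ous2, Ne.symm n_tion2, Ne.symm n_ment2, Ne.symm n_able2, Ne.symm t_ed3, Ne.symm t_ly3, Ne.symm t_ing, Ne.symm t_ous, Ne.symm n_tion3, Ne.symm n_ment3, Ne.symm n_able3]
          | false =>
            have t_tion := (not_congr i_tion).mpr (ne_true_of_eq_false htion)
            cases hment : PySem.Str.endswith word "ment" with
            | true =>
              rw [i_ment.mpr hment]
              simp [PySem.Dict.get?, Ne.symm t_ed, Ne.symm t_ly, Ne.symm n_ing2, Ne.symm n_ous2, Ne.symm n_tion2, Ne.symm n_ment2, Ne.symm n_able2, Ne.symm t_ed3, Ne.symm t_ly3, Ne.symm t_ing, Ne.symm t_ous, Ne.symm n_tion3, Ne.symm n_ment3, Ne.symm n_able3]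
            | false =>
              have t_ment := (not_congr i_ment).mpr (ne_true_of_eq_false hment)
              cases hable : PySem.Str.endswith word "able" with
              | true =>
                rw [i_able.mpr hable]
                simp [PySem.Dict.get?, Ne.symm t_ed, Ne.symm t_ly, Ne.symm n_ing2, Ne.symm n_ous2, Ne.symm n_tion2, Ne.symm n_ment2, Ne.symm n_able2, Ne.symm t_ed3, Ne.symm t_ly3, Ne.symm t_ing, Ne.symm t_ous, Ne.symm n_tion3, Ne.symm n_ment3, Ne.symm n_able3]
              | false =>
                have t_able := (not_congr i_able).mpr (ne_true_of_eq_false hable)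
                simp [PySem.Dict.get?, Ne.symm t_ed, Ne.symm t_ly, Ne.symm n_ing2, Ne.symm n_ous2, Ne.symm n_tion2, Ne.symm n_ment2, Ne.symm n_able2, Ne.symm t_ed3, Ne.symm t_ly3, Ne.symm t_ing, Ne.symm t_ous, Ne.symm n_tion3, Ne.symm n_ment3, Ne.symm n_able3, Ne.symm t_ed4, Ne.symm t_ly4, Ne.symm t_ing4, Ne.symm t_ous4, Ne.symm t_tion, Ne.symm t_ment, Ne.symm t_able]

lemma foldl_append_map (f : String → String × String) (tokens : List String) (acc : List (String × String)) :
    tokens.foldl (fun tags word => tags ++ [f word]) acc = acc ++ tokens.map f := by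
  induction tokens generalizing acc with
  | nil => simp
  | cons x xs ih => simp [List.foldl, ih]

-- ===== VERDICT (by name: the statement is the Claim_ definition above) =====
theorem simple_pos_tag_spec : Claim_equal_simple_pos_tag := by
  intro tokens _
  unfold Spec_simple_pos_tag simple_pos_tag simple_pos_tag_alt
  rw [foldl_append_map, foldl_append_map]
  simp only [List.nil_append]
  exact List.map_congr_left (fun word _ => by rw [tag_eq])
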